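-- pv_equiv track=rewrite | github.com/Wen0420/COMP9021_Principles-of-Programming | superpower.py | max_power_csHero
-- ===== SOURCE A (Python) =====
-- def max_power_csHero(L, param_nb_of_switches):
--
--     # L = 1 2 3 4       10
--     # L = -1 -2 -3  4   -2
--     # param_nb_of_switches = 3
--
--     total = sum(L)
--     sumL3 = []
--     for index in range(0, len(L) - param_nb_of_switches + 1):
--         flipping_sum = sum(L[index: index + param_nb_of_switches])
--         current_total = total - 2 * flipping_sum
--         sumL3.append(current_total)
--
--     return max(sumL3)
-- ===== SOURCE B (Python) =====
-- def max_power_csHero(L, param_nb_of_switches):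
--     # Sliding window: the answer is total - 2 * (minimum length-k window sum),
--     # and the minimum window sum is maintained in one O(n) pass.
--     k = param_nb_of_switches
--     w = sum(L[:k])
--     best = w
--     for i in range(k, len(L)):
--         w += L[i] - L[i - k]
--         if w < best:
--             best = w
--     return sum(L) - 2 * best
-- ===== Notes on version B (the rewrite author's own statement) =====
-- stated objective: faster
-- what changed: Replaces the per-index re-summation of each length-k slice (and the list of all candidate totals fed to max) by a single sliding-window pass that maintains the current window sum and its running minimum, returning total - 2*min.
-- outside the precondition, e.g. on max_power_csHero([1, 2, 3], -1): A returns 6, B raises IndexError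
import Mathlib
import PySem

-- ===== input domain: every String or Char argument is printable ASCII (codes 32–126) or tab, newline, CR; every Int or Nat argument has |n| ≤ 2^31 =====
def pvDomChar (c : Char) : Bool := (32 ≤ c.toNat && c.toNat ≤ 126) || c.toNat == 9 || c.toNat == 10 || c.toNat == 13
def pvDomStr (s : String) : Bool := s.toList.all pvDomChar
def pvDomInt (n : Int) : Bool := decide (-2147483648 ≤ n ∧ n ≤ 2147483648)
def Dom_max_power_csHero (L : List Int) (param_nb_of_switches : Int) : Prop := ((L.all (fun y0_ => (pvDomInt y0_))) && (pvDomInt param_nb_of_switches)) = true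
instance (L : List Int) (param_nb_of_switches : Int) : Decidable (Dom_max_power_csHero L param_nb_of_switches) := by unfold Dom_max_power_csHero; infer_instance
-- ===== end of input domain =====

-- B replaces A's per-index slice re-summation by a single sliding-window pass
-- (total - 2 * minimum window sum); objective: faster (O(n) instead of O(n*k)).


-- ===== PORT A =====
def max_power_csHero (L : List Int) (param_nb_of_switches : Int) : Int :=
  let total := L.sum
  let sumL3 := (PySem.List.pyRange 0 ((L.length : Int) - param_nb_of_switches + 1) 1).foldl
    (fun acc index =>
      let flipping_sum := (PySem.List.slice L (some index) (some (index + param_nb_of_switches))).sum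
      acc ++ [total - 2 * flipping_sum]) []
  match PySem.List.max? sumL3 (fun x => x) with
  | some m => m
  | none => 0      -- max([]) raises ValueError in Python: excluded by Pre_

-- ===== PORT B =====
def max_power_csHero_alt (L : List Int) (param_nb_of_switches : Int) : Int :=
  let k := param_nb_of_switches
  let w0 := (PySem.List.slice L none (some k)).sum          -- sum(L[:k])
  let p := (PySem.List.pyRange k (L.length : Int) 1).foldl
    (fun (p : Int × Int) i =>
      -- L[i], L[i-k]: indices are in range for every input Pre_ admits, so getD 0 is never taken
      let w := p.1 + PySem.List.pyGetD L i 0 - PySem.List.pyGetD L (i - k) 0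
      (w, if w < p.2 then w else p.2)) (w0, w0)
  L.sum - 2 * p.2

-- ===== PRECONDITION & SPEC =====
-- Pre_ excludes param_nb_of_switches > len(L), where A raises ValueError (max of an empty list),
-- and negative switch counts — outside the natural domain of a window length: there A's value is an
-- accident of Python's negative-slice semantics, and B's own algorithm raises IndexError.
def Pre_max_power_csHero (L : List Int) (param_nb_of_switches : Int) : Prop :=
  0 ≤ param_nb_of_switches ∧ param_nb_of_switches ≤ (L.length : Int)
instance (L : List Int) (param_nb_of_switches : Int) : Decidable (Pre_max_power_csHero L param_nb_of_switches) := by unfold Pre_max_power_csHero; infer_instance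
def pvWitness_max_power_csHero : List Int × Int := ([1, 2, 3, 4], 3)

def Spec_max_power_csHero (L : List Int) (param_nb_of_switches : Int) (out : Int) : Prop := out = max_power_csHero_alt L param_nb_of_switches
instance (L : List Int) (param_nb_of_switches : Int) (out : Int) : Decidable (Spec_max_power_csHero L param_nb_of_switches out) := by unfold Spec_max_power_csHero; infer_instance

-- ===== CLAIM (what is proved, stated in full; the proofs are below) =====
def Claim_equal_max_power_csHero : Prop := ∀ (L : List Int) (param_nb_of_switches : Int), Dom_max_power_csHero L param_nb_of_switches → Pre_max_power_csHero L param_nb_of_switches → Spec_max_power_csHero L param_nb_of_switches (max_power_csHero L param_nb_of_switches)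

-- ===== LEMMAS AND PROOFS =====

-- window sum: sum of L[j : j+kn]
def pvWs (L : List Int) (kn j : Nat) : Int := ((L.drop j).take kn).sum

-- sliding step: adding the element entering the window and removing the one leaving it
lemma pvSlide (L : List Int) (kn t : Nat) (h : t + kn < L.length) :
    pvWs L kn t + L.getD (t + kn) 0 - L.getD t 0 = pvWs L kn (t + 1) := by
  have ht : t < L.length := by omega
  have hk' : kn < (L.drop t).length := by simp; omega
  have h1 : (List.take (kn + 1) (L.drop t)).sum = (List.take kn (L.drop t)).sum + (L.drop t)[kn] :=
    List.sum_take_succ _ _ hk'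
  have h3 : (L.drop t)[kn]'hk' = L[t + kn]'h := by
    simp [List.getElem_drop]
  have h4 : List.take (kn + 1) (L.drop t) = L[t] :: List.take kn (L.drop (t + 1)) := by
    rw [List.drop_eq_getElem_cons ht]; rfl
  have h5 : L.getD (t + kn) 0 = L[t + kn]'h := List.getD_eq_getElem L 0 h
  have h6 : L.getD t 0 = L[t]'ht := List.getD_eq_getElem L 0 ht
  rw [h4, List.sum_cons, h3] at h1
  unfold pvWs
  rw [h5, h6]
  linarith

-- the loop invariant of B's single pass, over a Nat-indexed fold
lemma pvInv (L : List Int) (kn : Nat) (t : Nat) (h : t + kn ≤ L.length) :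
    ((List.range t).foldl
      (fun (p : Int × Int) (s : Nat) =>
        (p.1 + L.getD (s + kn) 0 - L.getD s 0,
         if p.1 + L.getD (s + kn) 0 - L.getD s 0 < p.2 then p.1 + L.getD (s + kn) 0 - L.getD s 0 else p.2)) ((L.take kn).sum, (L.take kn).sum)).1 = pvWs L kn t ∧
    (∃ j, j ≤ t ∧ ((List.range t).foldl
      (fun (p : Int × Int) (s : Nat) =>
        (p.1 + L.getD (s + kn) 0 - L.getD s 0,
         if p.1 + L.getD (s + kn) 0 - L.getD s 0 < p.2 then p.1 + L.getD (s + kn) 0 - L.getD s 0 else p.2)) ((L.take kn).sum, (L.take kn).sum)).2 = pvWs L kn j) ∧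
    (∀ j ≤ t, ((List.range t).foldl
      (fun (p : Int × Int) (s : Nat) =>
        (p.1 + L.getD (s + kn) 0 - L.getD s 0,
         if p.1 + L.getD (s + kn) 0 - L.getD s 0 < p.2 then p.1 + L.getD (s + kn) 0 - L.getD s 0 else p.2)) ((L.take kn).sum, (L.take kn).sum)).2 ≤ pvWs L kn j) := by
  induction t with
  | zero =>
    refine ⟨by simp [pvWs], ⟨0, le_refl _, by simp [pvWs]⟩, ?_⟩
    intro j hj; interval_cases j; simp [pvWs]
  | succ t ih =>
    have h' : t + kn ≤ L.length := by omega
    obtain ⟨ih1, ⟨j0, hj0, ih2⟩, ih3⟩ := ih h'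
    rw [List.range_succ, List.foldl_append]
    set r := (List.range t).foldl
      (fun (p : Int × Int) (s : Nat) =>
        (p.1 + L.getD (s + kn) 0 - L.getD s 0,
         if p.1 + L.getD (s + kn) 0 - L.getD s 0 < p.2 then p.1 + L.getD (s + kn) 0 - L.getD s 0 else p.2)) ((L.take kn).sum, (L.take kn).sum) with hr
    have hw : r.1 + L[t + kn]?.getD 0 - L[t]?.getD 0 = pvWs L kn (t + 1) := by
      have hs := pvSlide L kn t (by omega)
      rw [← ih1] at hs
      simpa [List.getD_eq_getElem?_getD] using hs
    simp only [List.foldl_cons, List.foldl_nil, List.getD_eq_getElem?_getD]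
    refine ⟨hw, ?_, ?_⟩
    · by_cases hlt : r.1 + L[t + kn]?.getD 0 - L[t]?.getD 0 < r.2
      · exact ⟨t + 1, le_refl _, by rw [if_pos hlt]; exact hw⟩
      · exact ⟨j0, by omega, by rw [if_neg hlt]; exact ih2⟩
    · intro j hj
      by_cases hlt : r.1 + L[t + kn]?.getD 0 - L[t]?.getD 0 < r.2
      · rw [if_pos hlt]
        rcases Nat.lt_or_ge j (t + 1) with hj' | hj'
        · have := ih3 j (by omega); omega
        · have hj'' : j = t + 1 := by omega
          rw [hj'', ← hw]
      · rw [if_neg hlt]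
        rcases Nat.lt_or_ge j (t + 1) with hj' | hj'
        · exact ih3 j (by omega)
        · have hj'' : j = t + 1 := by omega
          rw [hj'', ← hw]; omega

-- B's port computes total − 2·best, where best is a minimum window sum
lemma pvAltChar (L : List Int) (k : Int) (hk0 : 0 ≤ k) (hkl : k ≤ (L.length : Int)) :
    ∃ best, max_power_csHero_alt L k = L.sum - 2 * best ∧
      (∃ j, j ≤ L.length - k.toNat ∧ best = pvWs L k.toNat j) ∧
      (∀ j ≤ L.length - k.toNat, best ≤ pvWs L k.toNat j) := by
  obtain ⟨kn, rfl⟩ : ∃ kn : Nat, k = (kn : Int) := ⟨k.toNat, (Int.toNat_of_nonneg hk0).symm⟩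
  have hkn : kn ≤ L.length := by exact_mod_cast hkl
  have hnk : ((L.length : Int) - (kn : Int)).toNat = L.length - kn := by omega
  have hrange : PySem.List.pyRange (kn : Int) (L.length : Int) 1
      = (List.range (L.length - kn)).map (fun s => (kn : Int) + (s : Nat)) := by
    rw [PySem.List.pyRange_one, hnk]
  have hslice : PySem.List.slice L none (some ((kn : Nat) : Int)) = L.take kn := by
    rw [PySem.List.slice_to L (by positivity)]; simp
  have hfun : (fun (p : Int × Int) (s : Nat) =>
      (fun (p : Int × Int) (i : Int) =>
        let w := p.1 + PySem.List.pyGetD L i 0 - PySem.List.pyGetD L (i - (kn : Int)) 0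
        (w, if w < p.2 then w else p.2)) p ((kn : Int) + (s : Nat)))
      = (fun (p : Int × Int) (s : Nat) =>
        (p.1 + L.getD (s + kn) 0 - L.getD s 0,
         if p.1 + L.getD (s + kn) 0 - L.getD s 0 < p.2 then p.1 + L.getD (s + kn) 0 - L.getD s 0 else p.2)) := by
    funext p s
    have e1 : (kn : Int) + (s : Nat) = ((s + kn : Nat) : Int) := by push_cast; ring
    simp only [e1]
    have e2 : ((s + kn : Nat) : Int) - (kn : Int) = ((s : Nat) : Int) := by push_cast; ring
    simp only [e2, PySem.List.pyGetD_natCast]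
  obtain ⟨h1, h2, h3⟩ := pvInv L kn (L.length - kn) (by omega)
  refine ⟨_, ?_, h2, h3⟩
  unfold max_power_csHero_alt
  simp only [hrange, hslice, List.foldl_map]
  rw [hfun]

-- A's port equals total − 2·best for ANY minimum window sum best
lemma pvAChar (L : List Int) (k : Int) (hk0 : 0 ≤ k) (hkl : k ≤ (L.length : Int))
    (best : Int)
    (hmem : ∃ j, j ≤ L.length - k.toNat ∧ best = pvWs L k.toNat j)
    (hle : ∀ j ≤ L.length - k.toNat, best ≤ pvWs L k.toNat j) :
    max_power_csHero L k = L.sum - 2 * best := by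
  obtain ⟨kn, rfl⟩ : ∃ kn : Nat, k = (kn : Int) := ⟨k.toNat, (Int.toNat_of_nonneg hk0).symm⟩
  simp only [Int.toNat_natCast] at hmem hle
  have hkn : kn ≤ L.length := by exact_mod_cast hkl
  have hm : ((L.length : Int) - (kn : Int) + 1).toNat = L.length - kn + 1 := by omega
  have hrange : PySem.List.pyRange 0 ((L.length : Int) - (kn : Int) + 1) 1
      = (List.range (L.length - kn + 1)).map (fun j => (0 : Int) + (j : Nat)) := by
    rw [PySem.List.pyRange_one]
    simp only [Int.sub_zero, hm]
  have hslice : ∀ j : Nat,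
      (PySem.List.slice L (some ((0 : Int) + (j : Nat))) (some (((0 : Int) + (j : Nat)) + (kn : Int)))).sum
        = pvWs L kn j := by
    intro j
    have e : (0 : Int) + (j : Nat) = ((j : Nat) : Int) := by ring
    rw [e, PySem.List.slice_natCast_add]
    rfl
  have hsum : (PySem.List.pyRange 0 ((L.length : Int) - (kn : Int) + 1) 1).foldl
      (fun acc index =>
        acc ++ [L.sum - 2 * (PySem.List.slice L (some index) (some (index + (kn : Int)))).sum]) []
      = (List.range (L.length - kn + 1)).map (fun j => L.sum - 2 * pvWs L kn j) := by
    rw [hrange, List.foldl_map, PySem.List.foldl_append_singleton_eq_map]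
    simp only [List.nil_append]
    exact List.map_congr_left (fun j _ => by rw [hslice j])
  unfold max_power_csHero
  simp only [hsum]
  have hne : (List.range (L.length - kn + 1)).map (fun j => L.sum - 2 * pvWs L kn j) ≠ [] := by
    simp
  cases hmax : PySem.List.max? ((List.range (L.length - kn + 1)).map (fun j => L.sum - 2 * pvWs L kn j)) (fun x => x) with
  | none => exact absurd ((PySem.List.max?_eq_none_iff _ _).mp hmax) hne
  | some v =>
    obtain ⟨j0, hj0, hb⟩ := hmem
    have hub := PySem.List.max?_isMax hmax
    have hv := PySem.List.max?_mem hmax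
    obtain ⟨j1, hj1, hv1⟩ := List.mem_map.mp hv
    have hj1' : j1 ≤ L.length - kn := by
      have := List.mem_range.mp hj1; omega
    have hle1 : best ≤ pvWs L kn j1 := hle j1 hj1'
    have hmem0 : L.sum - 2 * pvWs L kn j0 ∈ (List.range (L.length - kn + 1)).map (fun j => L.sum - 2 * pvWs L kn j) :=
      List.mem_map.mpr ⟨j0, List.mem_range.mpr (by omega), rfl⟩
    have h2 := hub _ hmem0
    simp only at h2 hv1
    show v = L.sum - 2 * best
    rw [hb]
    omega

-- ===== VERDICT (by name: the statement is the Claim_ definition above) =====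
theorem max_power_csHero_spec : Claim_equal_max_power_csHero := by
  intro L k _ hpre
  obtain ⟨hk0, hkl⟩ := hpre
  obtain ⟨best, hB, hmem, hle⟩ := pvAltChar L k hk0 hkl
  unfold Spec_max_power_csHero
  rw [hB, pvAChar L k hk0 hkl best hmem hle]
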